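-- pv_equiv track=rewrite | github.com/AhmadTibrizi/pemrograman-I-modul-4 | python/PRAK403-2510817210027-Ahmad_Tibrizi.py | silang
-- ===== SOURCE A (Python) =====
-- def silang(angka_besar, angka_kecil):
--     selisih = angka_besar-angka_kecil + 1
--     list_angka_besar = []
--     list_angka_kecil = []
--     for i in range(selisih):
--         list_angka_besar.append(angka_besar-i)
--         list_angka_kecil.append(angka_kecil+i)
--
--     return [list_angka_besar, list_angka_kecil]
-- ===== SOURCE B (Python) =====
-- def _seg(lo, hi):
--     # returns (descending hi..lo, ascending lo..hi) by divide and conquer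
--     if lo > hi:
--         return [], []
--     if lo == hi:
--         return [lo], [lo]
--     mid = (lo + hi) // 2
--     d1, a1 = _seg(lo, mid)
--     d2, a2 = _seg(mid + 1, hi)
--     return d2 + d1, a1 + a2
--
-- def silang(angka_besar, angka_kecil):
--     turun, naik = _seg(angka_kecil, angka_besar)
--     return [turun, naik]
-- ===== Notes on version B (the rewrite author's own statement) =====
-- stated objective: alternative
-- what changed: Replaces the single counting loop that appends to two accumulators with a divide-and-conquer recursion: the interval is split at its midpoint, each half yields its (descending, ascending) pair, and the halves are concatenated.
import Mathlib
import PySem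

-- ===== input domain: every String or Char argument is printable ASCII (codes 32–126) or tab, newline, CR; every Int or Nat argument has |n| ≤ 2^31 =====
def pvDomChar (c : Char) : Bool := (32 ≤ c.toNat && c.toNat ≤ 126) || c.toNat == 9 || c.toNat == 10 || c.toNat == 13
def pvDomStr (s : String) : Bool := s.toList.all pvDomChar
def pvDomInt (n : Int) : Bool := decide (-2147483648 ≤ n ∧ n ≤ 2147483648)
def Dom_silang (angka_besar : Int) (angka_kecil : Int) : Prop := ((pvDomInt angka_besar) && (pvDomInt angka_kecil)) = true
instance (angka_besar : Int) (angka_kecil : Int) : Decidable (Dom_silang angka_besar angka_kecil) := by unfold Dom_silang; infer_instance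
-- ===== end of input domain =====

-- B replaces the counting loop with a midpoint divide-and-conquer recursion (alternative decomposition).

-- ===== PORT A =====
def silang (angka_besar : Int) (angka_kecil : Int) : List (List Int) :=
  let selisih := angka_besar - angka_kecil + 1
  let p := (PySem.List.pyRange 0 selisih 1).foldl
    (fun (p : List Int × List Int) i => (p.1 ++ [angka_besar - i], p.2 ++ [angka_kecil + i]))
    ([], [])
  [p.1, p.2]

-- ===== PORT B =====
-- _seg from Source B: divide and conquer on the interval [lo, hi].
-- Fuel (= interval length, ample by segGo_eq) makes the recursion structural; the algorithm is Source B's.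
def segGo : Nat → Int → Int → List Int × List Int
  | 0, _, _ => ([], [])
  | fuel+1, lo, hi =>
    if lo > hi then ([], [])
    else if lo = hi then ([lo], [lo])
    else
      let mid := PySem.Int.floordiv (lo + hi) 2
      let p1 := segGo fuel lo mid
      let p2 := segGo fuel (mid + 1) hi
      (p2.1 ++ p1.1, p1.2 ++ p2.2)

def segB (lo hi : Int) : List Int × List Int := segGo (hi + 1 - lo).toNat lo hi

def silang_alt (angka_besar : Int) (angka_kecil : Int) : List (List Int) :=
  let p := segB angka_kecil angka_besar
  [p.1, p.2]

-- ===== PRECONDITION & SPEC =====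
def Spec_silang (angka_besar : Int) (angka_kecil : Int) (out : List (List Int)) : Prop := out = silang_alt angka_besar angka_kecil
instance (angka_besar : Int) (angka_kecil : Int) (out : List (List Int)) : Decidable (Spec_silang angka_besar angka_kecil out) := by unfold Spec_silang; infer_instance

-- ===== CLAIM (what is proved, stated in full; the proofs are below) =====
def Claim_equal_silang : Prop := ∀ (angka_besar : Int) (angka_kecil : Int), Dom_silang angka_besar angka_kecil → Spec_silang angka_besar angka_kecil (silang angka_besar angka_kecil)

-- ===== LEMMAS AND PROOFS =====

theorem foldl_two_append (f g : Int → Int) (xs : List Int) (a1 a2 : List Int) :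
    xs.foldl (fun (p : List Int × List Int) i => (p.1 ++ [f i], p.2 ++ [g i])) (a1, a2)
      = (a1 ++ xs.map f, a2 ++ xs.map g) := by
  induction xs generalizing a1 a2 with
  | nil => simp
  | cons x xs ih => simp [List.foldl_cons, ih]

-- segGo computes the reversed and forward ascending range lo..hi, given enough fuel
theorem segGo_eq (fuel : Nat) : ∀ (lo hi : Int), (hi + 1 - lo).toNat ≤ fuel →
    segGo fuel lo hi = ((PySem.List.pyRange lo (hi + 1) 1).reverse, PySem.List.pyRange lo (hi + 1) 1) := by
  induction fuel with
  | zero =>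
    intro lo hi hle
    have : hi < lo := by omega
    simp [segGo, PySem.List.pyRange_one_eq_nil (by omega : hi + 1 ≤ lo)]
  | succ fuel ih =>
    intro lo hi hle
    by_cases hgt : lo > hi
    · simp [segGo, hgt, PySem.List.pyRange_one_eq_nil (by omega : hi + 1 ≤ lo)]
    · by_cases heq : lo = hi
      · simp [segGo, heq, PySem.List.pyRange_one_singleton]
      · have hlt : lo < hi := by omega
        have hmid := PySem.Int.floordiv_two_mid_bounds (lo := lo) (hi := hi) (by omega)
        have hmidlt : PySem.Int.floordiv (lo + hi) 2 < hi := by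
          rw [PySem.Int.floordiv_eq_ediv_of_pos (by omega)]
          rw [PySem.Int.floordiv_eq_ediv_of_pos (by omega)] at hmid
          omega
        simp only [segGo, hgt, heq, if_false]
        rw [ih lo _ (by rw [PySem.Int.floordiv_eq_ediv_of_pos (by omega)] at hmid hmidlt ⊢; omega),
            ih _ hi (by rw [PySem.Int.floordiv_eq_ediv_of_pos (by omega)] at hmid hmidlt ⊢; omega)]
        have hsplit : PySem.List.pyRange lo (hi + 1) 1
            = PySem.List.pyRange lo (PySem.Int.floordiv (lo + hi) 2 + 1) 1
              ++ PySem.List.pyRange (PySem.Int.floordiv (lo + hi) 2 + 1) (hi + 1) 1 :=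
          PySem.List.pyRange_one_append _ _ _ (by omega) (by omega)
        rw [hsplit, List.reverse_append]

theorem segB_eq (lo hi : Int) :
    segB lo hi = ((PySem.List.pyRange lo (hi + 1) 1).reverse, PySem.List.pyRange lo (hi + 1) 1) :=
  segGo_eq _ lo hi le_rfl

theorem silang_spec_aux (b k : Int) : silang b k = silang_alt b k := by
  unfold silang silang_alt
  rw [segB_eq]
  simp only [foldl_two_append, List.nil_append]
  simp only [List.cons.injEq, and_true]
  refine ⟨?_, ?_⟩
  · rw [show PySem.List.pyRange k (b + 1) 1 = (PySem.List.pyRange b (k - 1) (-1)).reverse from by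
      rw [PySem.List.pyRange_neg_one_eq_reverse]; norm_num]
    rw [List.reverse_reverse, PySem.List.pyRange_neg_one, PySem.List.pyRange_one]
    have : b - (k - 1) = b - k + 1 := by ring
    rw [this]
    simp [List.map_map, Function.comp]
  · rw [PySem.List.pyRange_one, PySem.List.pyRange_one]
    have : b + 1 - k = b - k + 1 - 0 := by ring
    rw [this]
    simp [List.map_map, Function.comp]

-- ===== VERDICT (by name: the statement is the Claim_ definition above) =====
theorem silang_spec : Claim_equal_silang := by
  intro b k _
  exact silang_spec_aux b k
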